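-- pv_equiv track=rewrite | github.com/GrissonWu07/xuanwustock | quant_sim/ui.py | _build_replay_trade_lookup_by_signal_id
-- ===== SOURCE A (Python) =====
-- def _build_replay_trade_lookup_by_signal_id(trades: list[dict]) -> dict[int, dict]:
--     lookup: dict[int, dict] = {}
--     for trade in trades:
--         signal_id = trade.get("signal_id")
--         if signal_id in (None, ""):
--             continue
--         normalized_signal_id = int(signal_id)
--         existing = lookup.get(normalized_signal_id)
--         if existing is None:
--             lookup[normalized_signal_id] = trade
--             continue
--         existing_time = str(existing.get("executed_at") or existing.get("created_at") or "")
--         current_time = str(trade.get("executed_at") or trade.get("created_at") or "")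
--         if current_time >= existing_time:
--             lookup[normalized_signal_id] = trade
--     return lookup
-- ===== SOURCE B (Python) =====
-- def _ts_key(trade):
--     return str(trade.get("executed_at") or trade.get("created_at") or "")
--
--
-- def _build_replay_trade_lookup_by_signal_id(trades: list[dict]) -> dict[int, dict]:
--     # Phase 1: group trades by normalized signal id (first-seen key order).
--     groups: dict[int, list] = {}
--     for trade in trades:
--         signal_id = trade.get("signal_id")
--         if signal_id in (None, ""):
--             continue
--         groups.setdefault(int(signal_id), []).append(trade)
--     # Phase 2: per group, scan for the latest trade (ties -> last occurrence).
--     lookup: dict[int, dict] = {}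
--     for signal_id, group in groups.items():
--         best = group[0]
--         for trade in group[1:]:
--             if _ts_key(trade) >= _ts_key(best):
--                 best = trade
--         lookup[signal_id] = best
--     return lookup
-- ===== Notes on version B (the rewrite author's own statement) =====
-- stated objective: alternative
-- what changed: B replaces A's single-pass dict with a compare-on-collision update by a two-phase algorithm: first group all trades into per-signal-id lists, then scan each group once for its latest trade.
import Mathlib
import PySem

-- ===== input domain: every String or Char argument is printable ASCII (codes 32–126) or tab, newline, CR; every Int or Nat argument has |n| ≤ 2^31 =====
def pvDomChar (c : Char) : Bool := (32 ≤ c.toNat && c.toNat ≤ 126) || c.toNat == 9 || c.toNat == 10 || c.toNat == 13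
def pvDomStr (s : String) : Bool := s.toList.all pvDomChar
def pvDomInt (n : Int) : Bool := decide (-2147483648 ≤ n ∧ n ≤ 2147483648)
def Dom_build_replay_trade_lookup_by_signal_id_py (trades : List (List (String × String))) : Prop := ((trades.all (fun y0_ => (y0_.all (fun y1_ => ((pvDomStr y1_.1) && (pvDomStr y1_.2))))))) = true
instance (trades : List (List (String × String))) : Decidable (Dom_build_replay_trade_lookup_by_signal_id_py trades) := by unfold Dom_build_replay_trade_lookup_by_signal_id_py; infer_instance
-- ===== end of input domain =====

-- B replaces A's single-pass dict with compare-on-collision updates by a two-phase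
-- algorithm (group trades per signal id, then scan each group for its latest trade);
-- same asymptotic cost, equivalence of the returned dict is proved below.

-- trade.get(k): first-match lookup in the association list (the Python dict)
def pvGetS (t : List (String × String)) (k : String) : Option String :=
  (PySem.Dict.mk t).get? k

-- str(x or d) for an optional string x (Python: None and "" are falsy; str is identity here)
def pvOrD (o : Option String) (d : String) : String :=
  match o with
  | some s => if s = "" then d else s
  | none => d

-- str(trade.get("executed_at") or trade.get("created_at") or "")
def pvTimeKey (t : List (String × String)) : String :=
  pvOrD (pvGetS t "executed_at") (pvOrD (pvGetS t "created_at") "")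

-- ===== PORT A =====
-- one iteration of A's loop body (int(signal_id) failing = ValueError, excluded by Pre_)
def pvStepA (lookup : PySem.Dict Int (List (String × String))) (trade : List (String × String)) :
    PySem.Dict Int (List (String × String)) :=
  match pvGetS trade "signal_id" with
  | none => lookup
  | some s =>
    if s = "" then lookup
    else
      match PySem.Int.ofStr? s with
      | none => lookup
      | some n =>
        match lookup.get? n with
        | none => lookup.insert n trade
        | some existing =>
          if pvTimeKey existing ≤ pvTimeKey trade then lookup.insert n trade else lookup

def build_replay_trade_lookup_by_signal_id_py (trades : List (List (String × String))) : List (Int × List (String × String)) :=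
  (trades.foldl pvStepA PySem.Dict.empty).items

-- ===== PORT B =====
-- phase-1 loop body: groups.setdefault(int(signal_id), []).append(trade)
def pvStepB (groups : PySem.Dict Int (List (List (String × String)))) (trade : List (String × String)) :
    PySem.Dict Int (List (List (String × String))) :=
  match pvGetS trade "signal_id" with
  | none => groups
  | some s =>
    if s = "" then groups
    else
      match PySem.Int.ofStr? s with
      | none => groups
      | some n =>
        match groups.get? n with
        | none => groups.insert n [trade]
        | some l => groups.insert n (l ++ [trade])

-- phase-2 inner scan: best = group[0]; replace when _ts_key(trade) >= _ts_key(best)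
def pvPick (group : List (List (String × String))) : List (String × String) :=
  match group with
  | [] => []  -- unreachable: every group built by pvStepB is nonempty
  | t :: rest => rest.foldl (fun best u => if pvTimeKey best ≤ pvTimeKey u then u else best) t

def build_replay_trade_lookup_by_signal_id_py_alt (trades : List (List (String × String))) : List (Int × List (String × String)) :=
  ((trades.foldl pvStepB PySem.Dict.empty).items.foldl
      (fun lookup p => lookup.insert p.1 (pvPick p.2)) PySem.Dict.empty).items

-- ===== PRECONDITION & SPEC =====
-- Pre_ excludes exactly the inputs where Python raises ValueError: a trade whose
-- "signal_id" is present, non-empty, and not int()-parseable (both A and B raise there).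
def Pre_build_replay_trade_lookup_by_signal_id_py (trades : List (List (String × String))) : Prop :=
  (trades.all (fun t =>
    match pvGetS t "signal_id" with
    | none => true
    | some s => s == "" || (PySem.Int.ofStr? s).isSome)) = true
instance (trades : List (List (String × String))) : Decidable (Pre_build_replay_trade_lookup_by_signal_id_py trades) := by unfold Pre_build_replay_trade_lookup_by_signal_id_py; infer_instance

def pvWitness_build_replay_trade_lookup_by_signal_id_py : (List (List (String × String))) :=
  [[("signal_id", "1"), ("executed_at", "2024-01-02")],
   [("signal_id", " 1 "), ("created_at", "2024-01-01")],
   [("other", "x")]]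

def Spec_build_replay_trade_lookup_by_signal_id_py (trades : List (List (String × String))) (out : List (Int × List (String × String))) : Prop := out = build_replay_trade_lookup_by_signal_id_py_alt trades
instance (trades : List (List (String × String))) (out : List (Int × List (String × String))) : Decidable (Spec_build_replay_trade_lookup_by_signal_id_py trades out) := by unfold Spec_build_replay_trade_lookup_by_signal_id_py; infer_instance

-- ===== CLAIM (what is proved, stated in full; the proofs are below) =====
def Claim_equal_build_replay_trade_lookup_by_signal_id_py : Prop := ∀ (trades : List (List (String × String))), Dom_build_replay_trade_lookup_by_signal_id_py trades → Pre_build_replay_trade_lookup_by_signal_id_py trades → Spec_build_replay_trade_lookup_by_signal_id_py trades (build_replay_trade_lookup_by_signal_id_py trades)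

-- ===== LEMMAS AND PROOFS =====

theorem pvItems_empty' : (PySem.Dict.empty : PySem.Dict Int (List (String × String))).items = [] := rfl

-- A's lookup state, reconstructed from B's groups state: each group replaced by its pick
def pvRender (g : PySem.Dict Int (List (List (String × String)))) : PySem.Dict Int (List (String × String)) :=
  PySem.Dict.mk (g.items.map (fun p => (p.1, pvPick p.2)))

theorem pvRender_empty : pvRender PySem.Dict.empty = PySem.Dict.empty := rfl

theorem get?_pvRender_aux (l : List (Int × List (List (String × String)))) (n : Int) :
    (PySem.Dict.mk (l.map (fun p => (p.1, pvPick p.2)))).get? n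
      = ((PySem.Dict.mk l).get? n).map pvPick := by
  induction l with
  | nil => rfl
  | cons p rest ih =>
    obtain ⟨k, v⟩ := p
    simp only [List.map_cons, PySem.Dict.get?_mk_cons]
    by_cases h : (k == n) = true
    · simp [h]
    · simp [h, ih]

theorem get?_pvRender (g : PySem.Dict Int (List (List (String × String)))) (n : Int) :
    (pvRender g).get? n = (g.get? n).map pvPick := by
  cases g with
  | mk l => exact get?_pvRender_aux l n

theorem contains_pvRender (g : PySem.Dict Int (List (List (String × String)))) (n : Int) :
    (pvRender g).contains n = g.contains n := by
  rw [PySem.Dict.contains_eq_isSome_get?, PySem.Dict.contains_eq_isSome_get?, get?_pvRender]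
  cases g.get? n <;> rfl

theorem pvPick_append_singleton (l : List (List (String × String))) (t : List (String × String))
    (hl : l ≠ []) :
    pvPick (l ++ [t]) = if pvTimeKey (pvPick l) ≤ pvTimeKey t then t else pvPick l := by
  cases l with
  | nil => exact absurd rfl hl
  | cons a rest => simp [pvPick, List.foldl_append]

theorem pvStep_comm (g : PySem.Dict Int (List (List (String × String))))
    (t : List (String × String)) (hnd : g.keys.Nodup)
    (hne : ∀ p ∈ g.items, p.2 ≠ []) :
    pvStepA (pvRender g) t = pvRender (pvStepB g t) := by
  unfold pvStepA pvStepB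
  cases hs : pvGetS t "signal_id" with
  | none => rfl
  | some s =>
    by_cases hse : s = ""
    · simp [hse]
    · simp only [if_neg hse]
      cases ho : PySem.Int.ofStr? s with
      | none => rfl
      | some n =>
        dsimp only
        rw [get?_pvRender]
        cases hg : g.get? n with
        | none =>
          -- fresh key: both versions append their new entry at the end
          simp only [Option.map_none]
          have hc : g.contains n = false := by
            rw [PySem.Dict.contains_eq_isSome_get?, hg]; rfl
          have hcr : (pvRender g).contains n = false := by
            rw [contains_pvRender]; exact hc
          apply PySem.Dict.ext
          rw [PySem.Dict.items_insert_of_not_contains _ _ hcr]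
          simp [pvRender, PySem.Dict.items_insert_of_not_contains _ _ hc, pvPick]
        | some l =>
          have hlne : l ≠ [] := hne (n, l) (PySem.Dict.mem_items_of_get?_eq_some g hg)
          have hc : g.contains n = true := by
            rw [PySem.Dict.contains_eq_isSome_get?, hg]; rfl
          have hcr : (pvRender g).contains n = true := by
            rw [contains_pvRender]; exact hc
          have hpick := pvPick_append_singleton l t hlne
          simp only [Option.map_some]
          by_cases hle : pvTimeKey (pvPick l) ≤ pvTimeKey t
          · -- the new trade wins in both versions
            rw [if_pos hle]
            apply PySem.Dict.ext
            rw [PySem.Dict.items_insert_of_contains _ _ hcr]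
            simp only [pvRender, PySem.Dict.items_insert_of_contains _ _ hc, List.map_map]
            apply List.map_congr_left
            intro p _
            by_cases hpn : (p.1 == n) = true
            · simp [Function.comp, hpn, hpick, hle]
            · simp [Function.comp, hpn]
          · -- the stored trade stays the pick in both versions
            rw [if_neg hle]
            apply PySem.Dict.ext
            simp only [pvRender, PySem.Dict.items_insert_of_contains _ _ hc, List.map_map]
            apply List.map_congr_left
            intro p hp
            by_cases hpn : (p.1 == n) = true
            · have hpn' : p.1 = n := beq_iff_eq.mp hpn
              have hget : g.get? p.1 = some p.2 := PySem.Dict.get?_of_mem_items g hp hnd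
              have hp2 : p.2 = l := by
                rw [hpn', hg] at hget
                exact (Option.some.injEq _ _).mp hget.symm
              simp [Function.comp, hpn', hp2, hpick, hle]
            · simp [Function.comp, hpn]

theorem pvStepB_inv (g : PySem.Dict Int (List (List (String × String))))
    (t : List (String × String)) (hnd : g.keys.Nodup)
    (hne : ∀ p ∈ g.items, p.2 ≠ []) :
    (pvStepB g t).keys.Nodup ∧ ∀ p ∈ (pvStepB g t).items, p.2 ≠ [] := by
  unfold pvStepB
  cases pvGetS t "signal_id" with
  | none => exact ⟨hnd, hne⟩
  | some s =>
    by_cases hse : s = ""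
    · simp only [if_pos hse]; exact ⟨hnd, hne⟩
    · simp only [if_neg hse]
      cases PySem.Int.ofStr? s with
      | none => exact ⟨hnd, hne⟩
      | some n =>
        simp only []
        cases g.get? n with
        | none =>
          refine ⟨PySem.Dict.nodup_keys_insert _ _ _ hnd, ?_⟩
          intro p hp
          rcases (PySem.Dict.mem_items_insert _ _ _ _).mp hp with h | ⟨h, _⟩
          · subst h; simp
          · exact hne p h
        | some l =>
          refine ⟨PySem.Dict.nodup_keys_insert _ _ _ hnd, ?_⟩
          intro p hp
          rcases (PySem.Dict.mem_items_insert _ _ _ _).mp hp with h | ⟨h, _⟩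
          · subst h; simp
          · exact hne p h

theorem pvFold_comm (ts : List (List (String × String)))
    (g : PySem.Dict Int (List (List (String × String)))) (hnd : g.keys.Nodup)
    (hne : ∀ p ∈ g.items, p.2 ≠ []) :
    ts.foldl pvStepA (pvRender g) = pvRender (ts.foldl pvStepB g) := by
  induction ts generalizing g with
  | nil => rfl
  | cons t rest ih =>
    obtain ⟨hnd', hne'⟩ := pvStepB_inv g t hnd hne
    simp only [List.foldl_cons, pvStep_comm g t hnd hne]
    exact ih _ hnd' hne'

theorem pvGroups_inv (ts : List (List (String × String))) :
    (ts.foldl pvStepB PySem.Dict.empty).keys.Nodup ∧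
      ∀ p ∈ (ts.foldl pvStepB PySem.Dict.empty).items, p.2 ≠ [] := by
  have h : ∀ (ts : List (List (String × String)))
      (g : PySem.Dict Int (List (List (String × String)))), g.keys.Nodup →
      (∀ p ∈ g.items, p.2 ≠ []) →
      (ts.foldl pvStepB g).keys.Nodup ∧ ∀ p ∈ (ts.foldl pvStepB g).items, p.2 ≠ [] := by
    intro ts
    induction ts with
    | nil => intro g hnd hne; exact ⟨hnd, hne⟩
    | cons t rest ih =>
      intro g hnd hne
      obtain ⟨hnd', hne'⟩ := pvStepB_inv g t hnd hne
      exact ih _ hnd' hne'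
  exact h ts PySem.Dict.empty (by simp [PySem.Dict.empty, PySem.Dict.keys])
    (by intro p hp; simp [PySem.Dict.empty] at hp)

-- ===== VERDICT (by name: the statement is the Claim_ definition above) =====
theorem build_replay_trade_lookup_by_signal_id_py_spec : Claim_equal_build_replay_trade_lookup_by_signal_id_py := by
  intro trades _ _
  unfold Spec_build_replay_trade_lookup_by_signal_id_py
  unfold build_replay_trade_lookup_by_signal_id_py build_replay_trade_lookup_by_signal_id_py_alt
  obtain ⟨hnd, hne⟩ := pvGroups_inv trades
  have hfold := pvFold_comm trades PySem.Dict.empty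
    (by simp [PySem.Dict.empty, PySem.Dict.keys])
    (by intro p hp; simp [PySem.Dict.empty] at hp)
  rw [pvRender_empty] at hfold
  rw [hfold]
  rw [PySem.Dict.items_foldl_insert_fresh (k := fun p => p.1) (v := fun p => pvPick p.2)
    (d := PySem.Dict.empty) (l := (trades.foldl pvStepB PySem.Dict.empty).items)
    (by intro a _; simp [PySem.Dict.empty, PySem.Dict.contains_eq_isSome_get?, PySem.Dict.get?])
    (by exact hnd)]
  cases h : trades.foldl pvStepB PySem.Dict.empty with
  | mk li => simp [pvRender, pvItems_empty']
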